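-- pv_equiv track=rewrite | github.com/pypi-data/pypi-mirror-6 | packages/amplikyzer/amplikyzer-0.96.zip/amplikyzer-0.96/amplikyzer/utils.py | positionlines
-- ===== SOURCE A (Python) =====
-- def positionlines(numbers, digits, gapposchar="."):
--     """for a given iterable 'numbers' of integers and a given number of 'digits',
--     return a list of 'digits' strings (lines) that,
--     if printed in reverse order below each other,
--     constitute the vertically written 'numbers' (mod 10**digits)
--     """
--     lines = [ [] for i in range(digits) ]
--     if digits<=0: return lines
--     for i in numbers:
--         if i<0:
--             for l in lines:
--                 l.append(gapposchar)
--         elif i==0: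
--             lines[0].append("0")
--             for k in range(1,digits):
--                 lines[k].append(" ")
--         else:
--             for k in range(digits):
--                 c = str(i%10) if i!=0 else " "
--                 lines[k].append(c)
--                 i = i // 10
--     for k in range(digits):
--         lines[k] = "".join(lines[k])
--     return lines
-- ===== SOURCE B (Python) =====
-- def positionlines(numbers, digits, gapposchar="."):
--     """Build one digit-column per number, then transpose into lines."""
--     if digits <= 0:
--         return []
--     rows = []
--     for i in numbers:
--         if i < 0:
--             rows.append([gapposchar] * digits)
--         else:
--             s = str(i)
--             rows.append([s[len(s) - 1 - k] if k < len(s) else " "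
--                         for k in range(digits)])
--     return ["".join(row[k] for row in rows) for k in range(digits)]
-- ===== Notes on version B (the rewrite author's own statement) =====
-- stated objective: alternative
-- what changed: B replaces A's in-place mutation of digit lines with per-number digit-and-space arithmetic by building each number's full column at once from str(i) (covering the zero and truncation cases without special branches) and then transposing the columns into lines.
import Mathlib
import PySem

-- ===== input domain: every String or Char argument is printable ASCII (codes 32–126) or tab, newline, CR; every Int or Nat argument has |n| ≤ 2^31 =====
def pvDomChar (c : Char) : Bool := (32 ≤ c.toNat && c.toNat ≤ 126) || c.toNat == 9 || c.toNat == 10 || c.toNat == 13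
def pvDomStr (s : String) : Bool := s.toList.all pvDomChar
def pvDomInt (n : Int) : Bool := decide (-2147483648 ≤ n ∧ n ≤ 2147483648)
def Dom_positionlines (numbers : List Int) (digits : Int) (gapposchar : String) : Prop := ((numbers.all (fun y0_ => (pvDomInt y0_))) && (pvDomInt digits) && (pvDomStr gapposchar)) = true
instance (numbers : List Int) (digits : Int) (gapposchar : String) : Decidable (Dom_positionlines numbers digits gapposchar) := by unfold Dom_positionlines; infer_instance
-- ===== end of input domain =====

-- B builds each number's whole digit column from str(i) and transposes, instead of A's
-- in-place appends to the digit lines with per-number mod/div arithmetic (alternative decomposition, same cost).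

-- ===== PORT A =====
-- Python 'lines[k].append(c)'
def pvAppendAt (lines : List (List String)) (k : Nat) (c : String) : List (List String) :=
  lines.set k (lines.getD k [] ++ [c])

-- the body of A's 'for i in numbers' loop
def pvStepA (digits : Int) (gapposchar : String) (lines : List (List String)) (i : Int) : List (List String) :=
  if i < 0 then lines.map (fun l => l ++ [gapposchar])
  else if i = 0 then
    (PySem.List.pyRange 1 digits 1).foldl (fun ls k => pvAppendAt ls k.toNat " ")
      (pvAppendAt lines 0 "0")
  else
    ((PySem.List.pyRange 0 digits 1).foldl
      (fun (st : List (List String) × Int) k =>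
        (pvAppendAt st.1 k.toNat (if st.2 ≠ 0 then PySem.Int.toStr (PySem.Int.mod st.2 10) else " "),
         PySem.Int.floordiv st.2 10))
      (lines, i)).1

def positionlines (numbers : List Int) (digits : Int) (gapposchar : String) : List String :=
  let lines0 : List (List String) := (List.range digits.toNat).map (fun _ => [])
  if digits ≤ 0 then [] else
  let lines := numbers.foldl (pvStepA digits gapposchar) lines0
  lines.map (fun l => String.join l)

-- ===== PORT B =====
-- B's per-number digit column (the list comprehension over range(digits) in Source B; s = str(i) inlined)
def pvRowB (digits : Int) (gapposchar : String) (i : Int) : List String :=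
  if i < 0 then List.replicate digits.toNat gapposchar
  else (List.range digits.toNat).map (fun (k : Nat) =>
    if (k : Int) < PySem.Str.len (PySem.Int.toStr i) then
      ((PySem.Str.pyGet? (PySem.Int.toStr i) (PySem.Str.len (PySem.Int.toStr i) - 1 - (k : Int))).map
        (fun c => String.singleton c)).getD " "
    else " ")

def positionlines_alt (numbers : List Int) (digits : Int) (gapposchar : String) : List String :=
  if digits ≤ 0 then [] else
  let rows : List (List String) := numbers.map (pvRowB digits gapposchar)
  (List.range digits.toNat).map (fun k => String.join (rows.map (fun r => r.getD k "")))

-- ===== PRECONDITION & SPEC =====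
def Spec_positionlines (numbers : List Int) (digits : Int) (gapposchar : String) (out : List String) : Prop := out = positionlines_alt numbers digits gapposchar
instance (numbers : List Int) (digits : Int) (gapposchar : String) (out : List String) : Decidable (Spec_positionlines numbers digits gapposchar out) := by unfold Spec_positionlines; infer_instance

-- ===== CLAIM (what is proved, stated in full; the proofs are below) =====
def Claim_equal_positionlines : Prop := ∀ (numbers : List Int) (digits : Int) (gapposchar : String), Dom_positionlines numbers digits gapposchar → Spec_positionlines numbers digits gapposchar (positionlines numbers digits gapposchar)

-- ===== LEMMAS AND PROOFS =====

-- the string A appends to line k for the number i (= entry k of B's column for i)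
def pvCol (gapposchar : String) (i : Int) (k : Nat) : String :=
  if i < 0 then gapposchar
  else if i = 0 then (if k = 0 then "0" else " ")
  else if i.toNat / 10 ^ k = 0 then " "
  else PySem.Int.toStr ((i.toNat / 10 ^ k % 10 : Nat) : Int)

theorem pv_getD_map_range {α : Type} (f : Nat → α) (d k : Nat) (hk : k < d) (dft : α) :
    ((List.range d).map f).getD k dft = f k := by
  rw [List.getD_eq_getElem?_getD]
  simp [hk]

theorem pvAppendAt_map_range (g : Nat → List String) (d k : Nat) (hk : k < d) (c : String) :
    pvAppendAt ((List.range d).map g) k c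
      = (List.range d).map (fun j => if j = k then g j ++ [c] else g j) := by
  unfold pvAppendAt
  rw [pv_getD_map_range g d k hk]
  apply List.ext_getElem (by simp)
  intro n h1 h2
  simp only [List.getElem_set, List.getElem_map, List.getElem_range]
  by_cases h : n = k
  · simp [h]
  · simp only [if_neg h, if_neg (Ne.symm h)]

theorem pv_fold_appendAt_seg (c : String) (d : Nat) :
    ∀ (m a : Nat) (g : Nat → List String), a + m ≤ d →
    (List.range m).foldl (fun ls k => pvAppendAt ls (a + k) c) ((List.range d).map g)
      = (List.range d).map (fun j => if a ≤ j ∧ j < a + m then g j ++ [c] else g j) := by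
  intro m
  induction m with
  | zero =>
    intro a g _
    simp only [List.range_zero, List.foldl_nil]
    apply List.map_congr_left
    intro j _
    simp
  | succ m ih =>
    intro a g h
    rw [List.range_succ, List.foldl_append, ih a g (by omega)]
    simp only [List.foldl_cons, List.foldl_nil]
    rw [pvAppendAt_map_range _ _ _ (by omega)]
    apply List.map_congr_left
    intro j hj
    simp only [List.mem_range] at hj
    by_cases hja : j = a + m
    · simp [hja, show a ≤ a + m ∧ a + m < a + (m + 1) by omega]
    · by_cases hcond : a ≤ j ∧ j < a + m
      · simp [hja, hcond, show a ≤ j ∧ j < a + (m + 1) by omega]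
      · simp [hja, hcond, show ¬(a ≤ j ∧ j < a + (m + 1)) by omega]

-- the digit string A appends at step k of the positive branch, as a function of the original value
def pvDig (m : Nat) (k : Nat) : String :=
  if m / 10 ^ k = 0 then " " else PySem.Int.toStr ((m / 10 ^ k % 10 : Nat) : Int)

theorem pv_fold_pos (d : Nat) (m0 : Nat) :
    ∀ (m : Nat) (g : Nat → List String), m ≤ d →
    (List.range m).foldl
        (fun (st : List (List String) × Int) k =>
          (pvAppendAt st.1 k (if st.2 ≠ 0 then PySem.Int.toStr (PySem.Int.mod st.2 10) else " "),
           PySem.Int.floordiv st.2 10))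
        ((List.range d).map g, (m0 : Int))
      = ((List.range d).map (fun j => if j < m then g j ++ [pvDig m0 j] else g j),
         ((m0 / 10 ^ m : Nat) : Int)) := by
  intro m
  induction m with
  | zero =>
    intro g _
    simp
  | succ m ih =>
    intro g h
    rw [List.range_succ, List.foldl_append, ih g (by omega)]
    simp only [List.foldl_cons, List.foldl_nil, Prod.mk.injEq]
    have hc : (if ((m0 / 10 ^ m : Nat) : Int) ≠ 0
          then PySem.Int.toStr (PySem.Int.mod ((m0 / 10 ^ m : Nat) : Int) 10) else " ")
        = pvDig m0 m := by
      by_cases h0 : m0 / 10 ^ m = 0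
      · simp [pvDig, h0]
      · have hne : ((m0 / 10 ^ m : Nat) : Int) ≠ 0 := by exact_mod_cast h0
        rw [if_pos hne]
        unfold pvDig
        rw [if_neg h0]
        congr 1
        exact_mod_cast PySem.Int.mod_natCast (m0 / 10 ^ m) 10
    refine ⟨?_, ?_⟩
    · rw [hc, pvAppendAt_map_range _ _ _ (by omega)]
      apply List.map_congr_left
      intro j hj
      simp only [List.mem_range] at hj
      by_cases hjm : j = m
      · subst hjm
        simp [show j < j + 1 by omega]
      · by_cases hlt : j < m
        · simp [hjm, hlt, show j < m + 1 by omega]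
        · simp [hjm, hlt, show ¬(j < m + 1) by omega]
    · rw [show (10 : Int) = ((10 : Nat) : Int) from rfl, PySem.Int.floordiv_natCast]
      rw [Nat.div_div_eq_div_mul, ← pow_succ]

-- ===== characterisation of Nat.toDigits (the chars of str(m)) =====

theorem pv_toDigits_lt10 (r : Nat) (h : r < 10) : Nat.toDigits 10 r = [Nat.digitChar r] := by
  simp [Nat.toDigits, Nat.toDigitsCore, Nat.div_eq_of_lt h, Nat.mod_eq_of_lt h]

theorem pv_tdc_acc : ∀ (fuel n : Nat) (acc : List Char),
    Nat.toDigitsCore 10 fuel n acc = Nat.toDigitsCore 10 fuel n [] ++ acc := by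
  intro fuel
  induction fuel with
  | zero => intro n acc; simp [Nat.toDigitsCore]
  | succ fuel ih =>
    intro n acc
    simp only [Nat.toDigitsCore]
    by_cases h : n / 10 = 0 <;> simp [h]
    · rw [ih (n / 10) _, ih (n / 10) [Nat.digitChar (n % 10)]]
      simp

theorem pv_tdc_fuel : ∀ (n fuel fuel' : Nat), n < fuel → n < fuel' →
    Nat.toDigitsCore 10 fuel n [] = Nat.toDigitsCore 10 fuel' n [] := by
  intro n
  induction n using Nat.strong_induction_on with
  | _ n ih =>
    intro fuel fuel' hf hf'
    match fuel, fuel' with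
    | f + 1, f' + 1 =>
      simp only [Nat.toDigitsCore]
      by_cases h : n / 10 = 0 <;> simp [h]
      rw [pv_tdc_acc, pv_tdc_acc f']
      rw [ih (n / 10) (by omega) f f' (by omega) (by omega)]

theorem pv_toDigits_rec (n : Nat) (h : 10 ≤ n) :
    Nat.toDigits 10 n = Nat.toDigits 10 (n / 10) ++ [Nat.digitChar (n % 10)] := by
  have h10 : n / 10 ≠ 0 := by omega
  have step : Nat.toDigits 10 n = Nat.toDigitsCore 10 n (n / 10) [Nat.digitChar (n % 10)] := by
    rw [Nat.toDigits]
    simp only [Nat.toDigitsCore, h10, if_false]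
  rw [step, pv_tdc_acc, pv_tdc_fuel (n / 10) n (n / 10 + 1) (by omega) (by omega), ← Nat.toDigits]

theorem pv_rev_getElem? (n : Nat) (hn : 0 < n) :
    ∀ k, (Nat.toDigits 10 n).reverse[k]?
      = if n / 10 ^ k = 0 then none else some (Nat.digitChar (n / 10 ^ k % 10)) := by
  induction n using Nat.strong_induction_on with
  | _ n ih =>
    intro k
    by_cases hsmall : n < 10
    · rw [pv_toDigits_lt10 n hsmall]
      match k with
      | 0 => simp [Nat.mod_eq_of_lt hsmall, hn.ne']
      | k + 1 =>
        have : n / 10 ^ (k + 1) = 0 := Nat.div_eq_of_lt (lt_of_lt_of_le hsmall (by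
          calc (10 : Nat) = 10 ^ 1 := by norm_num
          _ ≤ 10 ^ (k + 1) := Nat.pow_le_pow_right (by norm_num) (by omega)))
        simp [this]
    · rw [pv_toDigits_rec n (by omega)]
      match k with
      | 0 =>
        simp
        omega
      | k + 1 =>
        rw [List.reverse_append]
        simp only [List.reverse_cons, List.reverse_nil, List.nil_append, List.cons_append,
          List.getElem?_cons_succ]
        rw [ih (n / 10) (by omega) (by omega) k]
        rw [Nat.div_div_eq_div_mul, ← pow_succ']

theorem pv_len_iff (m k : Nat) (hm : 0 < m) :
    k < (Nat.toDigits 10 m).length ↔ m / 10 ^ k ≠ 0 := by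
  have h := pv_rev_getElem? m hm k
  by_cases h0 : m / 10 ^ k = 0
  · rw [if_pos h0] at h
    rw [List.getElem?_eq_none_iff, List.length_reverse] at h
    constructor
    · intro hk; omega
    · intro hne; exact absurd h0 hne
  · rw [if_neg h0] at h
    have hk : k < (Nat.toDigits 10 m).length := by
      by_contra hk
      rw [List.getElem?_eq_none_iff.mpr (by simpa using Nat.le_of_not_lt hk)] at h
      simp at h
    exact ⟨fun _ => h0, fun _ => hk⟩

theorem pv_toChars_natCast (m : Nat) : PySem.Int.toChars ((m : Nat) : Int) = Nat.toDigits 10 m := by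
  simp [PySem.Int.toChars]

theorem pv_singleton_digit (r : Nat) (h : r < 10) :
    String.singleton (Nat.digitChar r) = PySem.Int.toStr ((r : Nat) : Int) := by
  apply String.toList_injective
  rw [PySem.Int.toList_toStr, pv_toChars_natCast, pv_toDigits_lt10 r h]
  simp

-- ===== B's column entries are exactly A's appended strings =====

theorem pv_row_getD (digits : Int) (gp : String) (i : Int) (k : Nat) (hk : k < digits.toNat) :
    (pvRowB digits gp i).getD k "" = pvCol gp i k := by
  unfold pvRowB pvCol
  by_cases hneg : i < 0
  · simp only [if_pos hneg]
    exact List.getD_replicate gp hk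
  · rw [if_neg hneg, if_neg hneg]
    rw [pv_getD_map_range _ _ _ hk]
    obtain ⟨m, rfl⟩ : ∃ m : Nat, i = (m : Int) :=
      ⟨i.toNat, (Int.toNat_of_nonneg (by omega)).symm⟩
    have hchars : (PySem.Int.toStr ((m : Nat) : Int)).toList = Nat.toDigits 10 m := by
      rw [PySem.Int.toList_toStr, pv_toChars_natCast]
    have hlen : PySem.Str.len (PySem.Int.toStr ((m : Nat) : Int))
        = ((Nat.toDigits 10 m).length : Int) := by
      rw [PySem.Str.len_eq, hchars]
    by_cases hm : m = 0
    · subst hm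
      have ht0 : Nat.toDigits 10 0 = ['0'] := by decide
      match k with
      | 0 => decide
      | k + 1 =>
        rw [hlen, ht0]
        norm_num
    · have hmpos : 0 < m := by omega
      have hne0 : ((m : Nat) : Int) ≠ 0 := by exact_mod_cast hm
      rw [if_neg hne0]
      by_cases hik : k < (Nat.toDigits 10 m).length
      · rw [if_pos (by rw [hlen]; exact_mod_cast hik)]
        have hdiv : m / 10 ^ k ≠ 0 := (pv_len_iff m k hmpos).mp hik
        have hidx : PySem.Str.len (PySem.Int.toStr ((m : Nat) : Int)) - 1 - (k : Int)
            = (((Nat.toDigits 10 m).length - 1 - k : Nat) : Int) := by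
          rw [hlen]; omega
        rw [hidx, PySem.Str.pyGet?_natCast, hchars]
        have hrev := pv_rev_getElem? m hmpos k
        rw [if_neg hdiv, List.getElem?_reverse hik] at hrev
        rw [hrev]
        simp only [Option.map_some, Option.getD_some]
        rw [pv_singleton_digit _ (Nat.mod_lt _ (by norm_num))]
        rw [if_neg (by simpa using hdiv), Int.toNat_natCast]
      · rw [if_neg (by rw [hlen]; exact_mod_cast hik)]
        have hdiv : m / 10 ^ k = 0 := by
          by_contra hne
          exact hik ((pv_len_iff m k hmpos).mpr hne)
        rw [Int.toNat_natCast, if_pos hdiv]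

-- ===== A's loop body, characterised =====

theorem pv_step (gp : String) (digits : Int) (hd : 0 < digits) (g : Nat → List String) (i : Int) :
    pvStepA digits gp ((List.range digits.toNat).map g) i
      = (List.range digits.toNat).map (fun j => g j ++ [pvCol gp i j]) := by
  unfold pvStepA
  by_cases hneg : i < 0
  · rw [if_pos hneg, List.map_map]
    apply List.map_congr_left
    intro j _
    simp [pvCol, hneg]
  · rw [if_neg hneg]
    by_cases hz : i = 0
    · rw [if_pos hz]
      rw [PySem.List.pyRange_one 1 digits, List.foldl_map]
      rw [pvAppendAt_map_range g digits.toNat 0 (by omega) "0"]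
      have hfun : (fun (ls : List (List String)) (k : Nat) => pvAppendAt ls ((1 : Int) + (k : Int)).toNat " ")
          = (fun ls k => pvAppendAt ls (1 + k) " ") := by
        funext ls k
        rw [show ((1 : Int) + (k : Int)).toNat = 1 + k by omega]
      rw [hfun]
      rw [pv_fold_appendAt_seg " " digits.toNat (digits - 1).toNat 1
        (fun j => if j = 0 then g j ++ ["0"] else g j) (by omega)]
      apply List.map_congr_left
      intro j hj
      simp only [List.mem_range] at hj
      by_cases hj0 : j = 0
      · subst hj0
        simp [pvCol, hz]
      · simp [pvCol, hz, hj0, show 1 ≤ j by omega, show j < 1 + (digits.toNat - 1) by omega]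
    · rw [if_neg hz]
      obtain ⟨m0, rfl⟩ : ∃ m0 : Nat, i = (m0 : Int) :=
        ⟨i.toNat, (Int.toNat_of_nonneg (by omega)).symm⟩
      rw [PySem.List.pyRange_one 0 digits, List.foldl_map]
      have hfun : (fun (st : List (List String) × Int) (k : Nat) =>
            (pvAppendAt st.1 ((0 : Int) + (k : Int)).toNat
               (if st.2 ≠ 0 then PySem.Int.toStr (PySem.Int.mod st.2 10) else " "),
             PySem.Int.floordiv st.2 10))
          = (fun (st : List (List String) × Int) (k : Nat) =>
            (pvAppendAt st.1 k
               (if st.2 ≠ 0 then PySem.Int.toStr (PySem.Int.mod st.2 10) else " "),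
             PySem.Int.floordiv st.2 10)) := by
        funext st k
        simp
      rw [show (digits - 0).toNat = digits.toNat by omega, hfun]
      rw [pv_fold_pos digits.toNat m0 digits.toNat g (le_refl _)]
      apply List.map_congr_left
      intro j hj
      simp only [List.mem_range] at hj
      rw [if_pos hj]
      have hm0 : m0 ≠ 0 := by exact_mod_cast hz
      simp [pvCol, pvDig, hneg, hm0]

theorem pv_foldA (gp : String) (digits : Int) (hd : 0 < digits) :
    ∀ (numbers : List Int) (g : Nat → List String),
    numbers.foldl (pvStepA digits gp) ((List.range digits.toNat).map g)
      = (List.range digits.toNat).map (fun j => g j ++ numbers.map (fun i => pvCol gp i j)) := by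
  intro numbers
  induction numbers with
  | nil => intro g; simp
  | cons i rest ih =>
    intro g
    rw [List.foldl_cons, pv_step gp digits hd g i, ih]
    apply List.map_congr_left
    intro j _
    simp

-- ===== VERDICT (by name: the statement is the Claim_ definition above) =====
theorem positionlines_spec : Claim_equal_positionlines := by
  unfold Claim_equal_positionlines
  intro numbers digits gp _
  unfold Spec_positionlines
  by_cases hd : digits ≤ 0
  · simp [positionlines, positionlines_alt, hd]
  · simp only [positionlines, positionlines_alt, if_neg hd]
    rw [pv_foldA gp digits (by omega) numbers (fun _ => [])]
    rw [List.map_map]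
    apply List.map_congr_left
    intro k hk
    simp only [List.mem_range] at hk
    simp only [Function.comp_apply, List.nil_append, List.map_map]
    congr 1
    apply List.map_congr_left
    intro i _
    exact (pv_row_getD digits gp i k hk).symm
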